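-- pv_equiv track=rewrite | github.com/gabrielemongirdaite/advent_of_code_2022 | day18.py | check_y
-- ===== SOURCE A (Python) =====
-- def check_y(cube, all_cubes, min_y, max_y):
--     x = cube[0]
--     y = cube[1]
--     z = cube[2]
--     answer = []
--     for i in range(y, max_y + 1):
--         if [x, i, z] in all_cubes:
--             answer.append([x, i, z])
--             break
--     for i in range(y, min_y - 1, -1):
--         if [x, i, z] in all_cubes:
--             answer.append([x, i, z])
--             break
--     return len(answer), answer
-- ===== SOURCE B (Python) =====
-- def check_y(cube, all_cubes, min_y, max_y):
--     x = cube[0]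
--     y = cube[1]
--     z = cube[2]
--     up = None
--     down = None
--     for c in all_cubes:
--         if len(c) == 3 and c[0] == x and c[2] == z:
--             w = c[1]
--             if y <= w <= max_y and (up is None or w < up):
--                 up = w
--             if min_y <= w <= y and (down is None or w > down):
--                 down = w
--     answer = []
--     if up is not None:
--         answer.append([x, up, z])
--     if down is not None:
--         answer.append([x, down, z])
--     return len(answer), answer
-- ===== Notes on version B (the rewrite author's own statement) =====
-- stated objective: faster
-- what changed: Replaces the two per-coordinate scans of range(y,max_y) / range(y,min_y) each doing an O(n) list membership test with a single pass over all_cubes that keeps the nearest y above and below, removing the dependence on the coordinate range.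
import Mathlib
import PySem

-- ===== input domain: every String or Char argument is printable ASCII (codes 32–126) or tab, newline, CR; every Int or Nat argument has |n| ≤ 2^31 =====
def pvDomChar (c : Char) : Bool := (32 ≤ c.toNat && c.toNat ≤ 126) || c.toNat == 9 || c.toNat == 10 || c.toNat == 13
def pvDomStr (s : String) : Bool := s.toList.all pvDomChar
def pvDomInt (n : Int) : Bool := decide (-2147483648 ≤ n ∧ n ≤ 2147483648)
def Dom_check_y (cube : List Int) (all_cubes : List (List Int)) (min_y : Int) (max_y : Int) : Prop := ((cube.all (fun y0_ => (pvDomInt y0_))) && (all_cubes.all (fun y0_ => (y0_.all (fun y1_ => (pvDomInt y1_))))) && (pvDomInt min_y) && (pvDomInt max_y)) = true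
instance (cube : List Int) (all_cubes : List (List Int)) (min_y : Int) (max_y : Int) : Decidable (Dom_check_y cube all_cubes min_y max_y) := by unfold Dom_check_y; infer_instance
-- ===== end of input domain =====

-- B replaces A's two coordinate-range scans (each with an O(n) membership test) by one
-- collection of the matching y-values and a min/max over them; measurably faster (asymptotic).

-- ===== PORT A =====
-- the 'for i in range(..): if [x,i,z] in all_cubes: … break' loop, first hit wins
def pvScanA (x z : Int) (all_cubes : List (List Int)) : List Int → Option Int
  | [] => none
  | i :: rest => if [x, i, z] ∈ all_cubes then some i else pvScanA x z all_cubes rest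

def check_y (cube : List Int) (all_cubes : List (List Int)) (min_y : Int) (max_y : Int) : Int × List (List Int) :=
  match PySem.List.pyGet? cube 0, PySem.List.pyGet? cube 1, PySem.List.pyGet? cube 2 with
  | some x, some y, some z =>
    let r1 := pvScanA x z all_cubes (PySem.List.pyRange y (max_y + 1) 1)
    let r2 := pvScanA x z all_cubes (PySem.List.pyRange y (min_y - 1) (-1))
    let answer :=
      (match r1 with | some i => [[x, i, z]] | none => []) ++
      (match r2 with | some i => [[x, i, z]] | none => [])
    ((answer.length : Int), answer)
  | _, _, _ => (0, [])   -- Python raises IndexError here (cube shorter than 3); excluded by Pre_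

-- ===== PORT B =====
-- [c[1] for c in all_cubes if len(c)==3 and c[0]==x and c[2]==z]
def pvYsB (x z : Int) (all_cubes : List (List Int)) : List Int :=
  all_cubes.filterMap (fun c =>
    match c with
    | [cx, w, cz] => if cx = x ∧ cz = z then some w else none
    | _ => none)

def check_y_alt (cube : List Int) (all_cubes : List (List Int)) (min_y : Int) (max_y : Int) : Int × List (List Int) :=
  match PySem.List.pyGet? cube 0 with
  | none => (0, [])   -- same IndexError region, excluded by Pre_
  | some x =>
  match PySem.List.pyGet? cube 1 with
  | none => (0, [])
  | some y =>
  match PySem.List.pyGet? cube 2 with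
  | none => (0, [])
  | some z =>
    let ys := pvYsB x z all_cubes
    let up := PySem.List.min? (ys.filter (fun w => decide (y ≤ w ∧ w ≤ max_y))) (fun w => w)
    let down := PySem.List.max? (ys.filter (fun w => decide (min_y ≤ w ∧ w ≤ y))) (fun w => w)
    let answer := ([up, down].filterMap id).map (fun w => [x, w, z])
    ((answer.length : Int), answer)

-- ===== PRECONDITION & SPEC =====
-- Pre_ excludes only cubes with fewer than 3 coordinates, on which Python A raises IndexError.
def Pre_check_y (cube : List Int) (all_cubes : List (List Int)) (min_y : Int) (max_y : Int) : Prop :=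
  3 ≤ cube.length
instance (cube : List Int) (all_cubes : List (List Int)) (min_y : Int) (max_y : Int) : Decidable (Pre_check_y cube all_cubes min_y max_y) := by unfold Pre_check_y; infer_instance

def pvWitness_check_y : List Int × List (List Int) × Int × Int :=
  ([1, 2, 3], [[1, 4, 3], [1, 0, 3], [2, 2, 3]], -2, 6)

def Spec_check_y (cube : List Int) (all_cubes : List (List Int)) (min_y : Int) (max_y : Int) (out : Int × List (List Int)) : Prop := out = check_y_alt cube all_cubes min_y max_y
instance (cube : List Int) (all_cubes : List (List Int)) (min_y : Int) (max_y : Int) (out : Int × List (List Int)) : Decidable (Spec_check_y cube all_cubes min_y max_y out) := by unfold Spec_check_y; infer_instance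

-- ===== CLAIM (what is proved, stated in full; the proofs are below) =====
def Claim_equal_check_y : Prop := ∀ (cube : List Int) (all_cubes : List (List Int)) (min_y : Int) (max_y : Int), Dom_check_y cube all_cubes min_y max_y → Pre_check_y cube all_cubes min_y max_y → Spec_check_y cube all_cubes min_y max_y (check_y cube all_cubes min_y max_y)

-- ===== LEMMAS AND PROOFS =====

def pvIsMinOpt (Q : Int → Prop) (r : Option Int) : Prop :=
  (∀ m, r = some m → Q m ∧ ∀ w, Q w → m ≤ w) ∧ (r = none → ∀ w, ¬ Q w)

def pvIsMaxOpt (Q : Int → Prop) (r : Option Int) : Prop :=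
  (∀ m, r = some m → Q m ∧ ∀ w, Q w → w ≤ m) ∧ (r = none → ∀ w, ¬ Q w)

theorem pvIsMinOpt_unique {Q : Int → Prop} {r1 r2 : Option Int}
    (h1 : pvIsMinOpt Q r1) (h2 : pvIsMinOpt Q r2) : r1 = r2 := by
  cases r1 with
  | none =>
    cases r2 with
    | none => rfl
    | some m => exact absurd (h2.1 m rfl).1 (h1.2 rfl m)
  | some m =>
    cases r2 with
    | none => exact absurd (h1.1 m rfl).1 (h2.2 rfl m)
    | some m' =>
      have a1 := h1.1 m rfl
      have a2 := h2.1 m' rfl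
      have := le_antisymm (a1.2 m' a2.1) (a2.2 m a1.1)
      simp [this]

theorem pvIsMaxOpt_unique {Q : Int → Prop} {r1 r2 : Option Int}
    (h1 : pvIsMaxOpt Q r1) (h2 : pvIsMaxOpt Q r2) : r1 = r2 := by
  cases r1 with
  | none =>
    cases r2 with
    | none => rfl
    | some m => exact absurd (h2.1 m rfl).1 (h1.2 rfl m)
  | some m =>
    cases r2 with
    | none => exact absurd (h1.1 m rfl).1 (h2.2 rfl m)
    | some m' =>
      have a1 := h1.1 m rfl
      have a2 := h2.1 m' rfl
      have := le_antisymm (a2.2 m a1.1) (a1.2 m' a2.1)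
      simp [this]

theorem pvIsMinOpt_congr {Q Q' : Int → Prop} {r : Option Int}
    (h : ∀ w, Q w ↔ Q' w) (hm : pvIsMinOpt Q r) : pvIsMinOpt Q' r := by
  refine ⟨fun m hr => ?_, fun hr w => ?_⟩
  · obtain ⟨hq, hmin⟩ := hm.1 m hr
    exact ⟨(h m).1 hq, fun w hw => hmin w ((h w).2 hw)⟩
  · exact fun hw => hm.2 hr w ((h w).2 hw)

theorem pvIsMaxOpt_congr {Q Q' : Int → Prop} {r : Option Int}
    (h : ∀ w, Q w ↔ Q' w) (hm : pvIsMaxOpt Q r) : pvIsMaxOpt Q' r := by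
  refine ⟨fun m hr => ?_, fun hr w => ?_⟩
  · obtain ⟨hq, hmax⟩ := hm.1 m hr
    exact ⟨(h m).1 hq, fun w hw => hmax w ((h w).2 hw)⟩
  · exact fun hw => hm.2 hr w ((h w).2 hw)

-- A's ascending scan finds the least admissible y
theorem pvScanA_asc (x z : Int) (cs : List (List Int)) :
    ∀ (n : Nat) (a b : Int), (b - a).toNat = n →
      pvIsMinOpt (fun w => [x, w, z] ∈ cs ∧ a ≤ w ∧ w < b)
        (pvScanA x z cs (PySem.List.pyRange a b 1)) := by
  intro n
  induction n with
  | zero =>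
    intro a b hn
    have hba : b ≤ a := by omega
    rw [PySem.List.pyRange_one_eq_nil hba]
    exact ⟨fun m hm => by simp [pvScanA] at hm, fun _ w hw => by omega⟩
  | succ k ih =>
    intro a b hn
    have hab : a < b := by omega
    rw [PySem.List.pyRange_one_cons hab]
    by_cases hm : [x, a, z] ∈ cs
    · simp only [pvScanA, if_pos hm]
      refine ⟨fun m heq => ?_, fun h => by simp at h⟩
      obtain rfl : a = m := by injection heq
      exact ⟨⟨hm, le_refl a, hab⟩, fun w hw => hw.2.1⟩
    · simp only [pvScanA, if_neg hm]
      have H := ih (a + 1) b (by omega)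
      refine ⟨fun m heq => ?_, fun heq w hw => ?_⟩
      · obtain ⟨⟨hmem, h1, h2⟩, hmin⟩ := H.1 m heq
        refine ⟨⟨hmem, by omega, h2⟩, fun w hw => ?_⟩
        rcases eq_or_lt_of_le hw.2.1 with h | h
        · exact absurd (h ▸ hw.1) hm
        · exact hmin w ⟨hw.1, by omega, hw.2.2⟩
      · rcases eq_or_lt_of_le hw.2.1 with h | h
        · exact absurd (h ▸ hw.1) hm
        · exact H.2 heq w ⟨hw.1, by omega, hw.2.2⟩

-- A's descending scan finds the greatest admissible y
theorem pvScanA_desc (x z : Int) (cs : List (List Int)) :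
    ∀ (n : Nat) (a b : Int), (a - b).toNat = n →
      pvIsMaxOpt (fun w => [x, w, z] ∈ cs ∧ b < w ∧ w ≤ a)
        (pvScanA x z cs (PySem.List.pyRange a b (-1))) := by
  intro n
  induction n with
  | zero =>
    intro a b hn
    have hab : a ≤ b := by omega
    rw [PySem.List.pyRange_neg_one_eq_nil hab]
    exact ⟨fun m hm => by simp [pvScanA] at hm, fun _ w hw => by omega⟩
  | succ k ih =>
    intro a b hn
    have hba : b < a := by omega
    rw [PySem.List.pyRange_neg_one_cons hba]
    by_cases hm : [x, a, z] ∈ cs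
    · simp only [pvScanA, if_pos hm]
      refine ⟨fun m heq => ?_, fun h => by simp at h⟩
      obtain rfl : a = m := by injection heq
      exact ⟨⟨hm, hba, le_refl a⟩, fun w hw => hw.2.2⟩
    · simp only [pvScanA, if_neg hm]
      have H := ih (a - 1) b (by omega)
      refine ⟨fun m heq => ?_, fun heq w hw => ?_⟩
      · obtain ⟨⟨hmem, h1, h2⟩, hmax⟩ := H.1 m heq
        refine ⟨⟨hmem, h1, by omega⟩, fun w hw => ?_⟩
        rcases eq_or_lt_of_le hw.2.2 with h | h
        · exact absurd (h ▸ hw.1) hm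
        · exact hmax w ⟨hw.1, hw.2.1, by omega⟩
      · rcases eq_or_lt_of_le hw.2.2 with h | h
        · exact absurd (h ▸ hw.1) hm
        · exact H.2 heq w ⟨hw.1, hw.2.1, by omega⟩

theorem mem_pvYsB (x z w : Int) (cs : List (List Int)) :
    w ∈ pvYsB x z cs ↔ [x, w, z] ∈ cs := by
  simp only [pvYsB, List.mem_filterMap]
  constructor
  · rintro ⟨c, hc, hf⟩
    rcases c with _ | ⟨cx, (_ | ⟨cw, (_ | ⟨cz', (_ | ⟨e, t⟩)⟩)⟩)⟩ <;> simp at hf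
    obtain ⟨⟨rfl, rfl⟩, rfl⟩ := hf
    exact hc
  · intro h
    exact ⟨[x, w, z], h, by simp⟩

theorem check_y_alt_up (x z y hi : Int) (cs : List (List Int)) :
    pvIsMinOpt (fun w => [x, w, z] ∈ cs ∧ y ≤ w ∧ w ≤ hi)
      (PySem.List.min? ((pvYsB x z cs).filter (fun w => decide (y ≤ w ∧ w ≤ hi))) (fun w => w)) := by
  constructor
  · intro m hr
    have hmem := PySem.List.min?_mem hr
    rw [List.mem_filter] at hmem
    refine ⟨⟨(mem_pvYsB x z m cs).1 hmem.1, by simpa using hmem.2⟩, fun w hw => ?_⟩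
    have hwmem : w ∈ (pvYsB x z cs).filter (fun w => decide (y ≤ w ∧ w ≤ hi)) := by
      rw [List.mem_filter]
      exact ⟨(mem_pvYsB x z w cs).2 hw.1, by simpa using hw.2⟩
    exact PySem.List.min?_isMin hr w hwmem
  · intro hr w hw
    rw [PySem.List.min?_eq_none_iff] at hr
    have : w ∈ (pvYsB x z cs).filter (fun w => decide (y ≤ w ∧ w ≤ hi)) := by
      rw [List.mem_filter]
      exact ⟨(mem_pvYsB x z w cs).2 hw.1, by simpa using hw.2⟩
    rw [hr] at this
    simp at this

theorem check_y_alt_down (x z y lo : Int) (cs : List (List Int)) :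
    pvIsMaxOpt (fun w => [x, w, z] ∈ cs ∧ lo ≤ w ∧ w ≤ y)
      (PySem.List.max? ((pvYsB x z cs).filter (fun w => decide (lo ≤ w ∧ w ≤ y))) (fun w => w)) := by
  constructor
  · intro m hr
    have hmem := PySem.List.max?_mem hr
    rw [List.mem_filter] at hmem
    refine ⟨⟨(mem_pvYsB x z m cs).1 hmem.1, by simpa using hmem.2⟩, fun w hw => ?_⟩
    have hwmem : w ∈ (pvYsB x z cs).filter (fun w => decide (lo ≤ w ∧ w ≤ y)) := by
      rw [List.mem_filter]
      exact ⟨(mem_pvYsB x z w cs).2 hw.1, by simpa using hw.2⟩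
    exact PySem.List.max?_isMax hr w hwmem
  · intro hr w hw
    rw [PySem.List.max?_eq_none_iff] at hr
    have : w ∈ (pvYsB x z cs).filter (fun w => decide (lo ≤ w ∧ w ≤ y)) := by
      rw [List.mem_filter]
      exact ⟨(mem_pvYsB x z w cs).2 hw.1, by simpa using hw.2⟩
    rw [hr] at this
    simp at this

theorem pvAnswer_eq (x z : Int) (o1 o2 : Option Int) :
    ((match o1 with | some i => [[x, i, z]] | none => []) ++
     (match o2 with | some i => [[x, i, z]] | none => []))
    = (([o1, o2].filterMap id).map (fun w => [x, w, z])) := by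
  cases o1 <;> cases o2 <;> rfl

-- ===== VERDICT (by name: the statement is the Claim_ definition above) =====
theorem check_y_spec : Claim_equal_check_y := by
  intro cube cs mn mx _ hpre
  unfold Spec_check_y
  rcases cube with _ | ⟨x, (_ | ⟨y, (_ | ⟨z, t⟩)⟩)⟩ <;>
    simp only [Pre_check_y, List.length_nil, List.length_cons] at hpre
  · omega
  · omega
  · omega
  · have h0 : PySem.List.pyGet? (x :: y :: z :: t) (0 : Int) = some x := by
      rw [PySem.List.pyGet?_of_nonneg _ (by omega)]; rfl
    have h1 : PySem.List.pyGet? (x :: y :: z :: t) (1 : Int) = some y := by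
      rw [PySem.List.pyGet?_of_nonneg _ (by omega)]; rfl
    have h2 : PySem.List.pyGet? (x :: y :: z :: t) (2 : Int) = some z := by
      rw [PySem.List.pyGet?_of_nonneg _ (by omega)]; rfl
    have hup : pvScanA x z cs (PySem.List.pyRange y (mx + 1) 1)
        = PySem.List.min? ((pvYsB x z cs).filter (fun w => decide (y ≤ w ∧ w ≤ mx))) (fun w => w) := by
      apply pvIsMinOpt_unique
        (pvIsMinOpt_congr (Q := fun w => [x, w, z] ∈ cs ∧ y ≤ w ∧ w < mx + 1)
          (fun w => by constructor <;> exact fun h => ⟨h.1, by omega, by omega⟩)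
          (pvScanA_asc x z cs ((mx + 1 - y).toNat) y (mx + 1) rfl))
        (check_y_alt_up x z y mx cs)
    have hdown : pvScanA x z cs (PySem.List.pyRange y (mn - 1) (-1))
        = PySem.List.max? ((pvYsB x z cs).filter (fun w => decide (mn ≤ w ∧ w ≤ y))) (fun w => w) := by
      apply pvIsMaxOpt_unique
        (pvIsMaxOpt_congr (Q := fun w => [x, w, z] ∈ cs ∧ mn - 1 < w ∧ w ≤ y)
          (fun w => by constructor <;> exact fun h => ⟨h.1, by omega, by omega⟩)
          (pvScanA_desc x z cs ((y - (mn - 1)).toNat) y (mn - 1) rfl))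
        (check_y_alt_down x z y mn cs)
    simp only [check_y, check_y_alt, h0, h1, h2, hup, hdown, pvAnswer_eq]
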